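-- pv_equiv track=rewrite | github.com/Minh-Tam-Solution/sdlc-orchestrator1 | backend/app/services/governance/stage_gating.py | _infer_required_stage
-- ===== SOURCE A (Python) =====
-- def _infer_required_stage(file_path: str) -> str:
--     """Infer which stage is required for a file path."""
--     file_lower = file_path.lower()
--
--     if "docs/00" in file_lower or "foundation" in file_lower:
--         return "stage_00_foundation"
--     elif "docs/01" in file_lower or "planning" in file_lower:
--         return "stage_01_planning"
--     elif "docs/02" in file_lower or "design" in file_lower or "adr" in file_lower:
--         return "stage_02_design"
--     elif "docs/03" in file_lower or "integrate" in file_lower: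
--         return "stage_03_integration"
--     elif any(x in file_lower for x in ["backend/app", "frontend/src", "src/"]):
--         return "stage_04_build"
--     elif "test" in file_lower or "e2e" in file_lower:
--         return "stage_05_test"
--     elif any(x in file_lower for x in ["docker", "k8s", "terraform", "deploy"]):
--         return "stage_06_deploy"
--     else:
--         return "stage_04_build"
-- ===== SOURCE B (Python) =====
-- _KEYWORD_STAGE = {
--     "docs/00": "stage_00_foundation",
--     "foundation": "stage_00_foundation",
--     "docs/01": "stage_01_planning",
--     "planning": "stage_01_planning",
--     "docs/02": "stage_02_design",
--     "design": "stage_02_design",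
--     "adr": "stage_02_design",
--     "docs/03": "stage_03_integration",
--     "integrate": "stage_03_integration",
--     "backend/app": "stage_04_build",
--     "frontend/src": "stage_04_build",
--     "src/": "stage_04_build",
--     "test": "stage_05_test",
--     "e2e": "stage_05_test",
--     "docker": "stage_06_deploy",
--     "k8s": "stage_06_deploy",
--     "terraform": "stage_06_deploy",
--     "deploy": "stage_06_deploy",
-- }
--
--
-- def _infer_required_stage(file_path: str) -> str:
--     """Infer which stage is required for a file path.
--
--     Collect every stage whose keyword occurs in the lowercased path and
--     return the lexicographically smallest one: the stage labels are named
--     so that their alphabetical order coincides with the pipeline's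
--     precedence order, so min() picks the same stage as the original
--     precedence ladder.  No match defaults to the build stage.
--     """
--     low = file_path.lower()
--     matched = [stage for kw, stage in _KEYWORD_STAGE.items() if kw in low]
--     return min(matched, default="stage_04_build")
-- ===== Notes on version B (the rewrite author's own statement) =====
-- stated objective: alternative
-- what changed: Instead of A's first-match precedence ladder, B maps each keyword to its stage label, collects every stage whose keyword occurs in the lowercased path, and returns the lexicographic minimum (default 'stage_04_build'), relying on the stage labels being named in precedence order.
import Mathlib
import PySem

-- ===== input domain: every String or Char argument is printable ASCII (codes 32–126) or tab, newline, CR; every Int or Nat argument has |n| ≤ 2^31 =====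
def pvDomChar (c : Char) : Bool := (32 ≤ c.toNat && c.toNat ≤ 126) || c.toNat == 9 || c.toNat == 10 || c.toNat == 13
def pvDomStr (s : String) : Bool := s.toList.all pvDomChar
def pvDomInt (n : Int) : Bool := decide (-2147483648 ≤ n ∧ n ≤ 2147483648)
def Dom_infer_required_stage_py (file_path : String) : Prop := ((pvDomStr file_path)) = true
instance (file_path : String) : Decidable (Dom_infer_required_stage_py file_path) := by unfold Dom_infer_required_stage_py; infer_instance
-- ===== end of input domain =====

-- B replaces A's precedence ladder with "collect every matching stage, return the lexicographic
-- minimum" — correct because the stage labels are named in precedence order (alternative, same cost).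

-- ===== PORT A =====
def infer_required_stage_py (file_path : String) : String :=
  let file_lower := PySem.Str.lower file_path
  if PySem.Str.isIn "docs/00" file_lower || PySem.Str.isIn "foundation" file_lower then
    "stage_00_foundation"
  else if PySem.Str.isIn "docs/01" file_lower || PySem.Str.isIn "planning" file_lower then
    "stage_01_planning"
  else if PySem.Str.isIn "docs/02" file_lower || PySem.Str.isIn "design" file_lower || PySem.Str.isIn "adr" file_lower then
    "stage_02_design"
  else if PySem.Str.isIn "docs/03" file_lower || PySem.Str.isIn "integrate" file_lower then
    "stage_03_integration"
  else if ["backend/app", "frontend/src", "src/"].any (fun x => PySem.Str.isIn x file_lower) then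
    "stage_04_build"
  else if PySem.Str.isIn "test" file_lower || PySem.Str.isIn "e2e" file_lower then
    "stage_05_test"
  else if ["docker", "k8s", "terraform", "deploy"].any (fun x => PySem.Str.isIn x file_lower) then
    "stage_06_deploy"
  else
    "stage_04_build"

-- ===== PORT B =====
-- the dict _KEYWORD_STAGE as an association list in insertion order
def pvKeywordStage : List (String × String) :=
  [ ("docs/00", "stage_00_foundation"),
    ("foundation", "stage_00_foundation"),
    ("docs/01", "stage_01_planning"),
    ("planning", "stage_01_planning"),
    ("docs/02", "stage_02_design"),
    ("design", "stage_02_design"),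
    ("adr", "stage_02_design"),
    ("docs/03", "stage_03_integration"),
    ("integrate", "stage_03_integration"),
    ("backend/app", "stage_04_build"),
    ("frontend/src", "stage_04_build"),
    ("src/", "stage_04_build"),
    ("test", "stage_05_test"),
    ("e2e", "stage_05_test"),
    ("docker", "stage_06_deploy"),
    ("k8s", "stage_06_deploy"),
    ("terraform", "stage_06_deploy"),
    ("deploy", "stage_06_deploy") ]

def infer_required_stage_py_alt (file_path : String) : String :=
  let low := PySem.Str.lower file_path
  let matched := pvKeywordStage.filterMap
    (fun kv => if PySem.Str.isIn kv.1 low then some kv.2 else none)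
  (PySem.List.min? matched (fun x => x)).getD "stage_04_build"

-- ===== PRECONDITION & SPEC =====
def Spec_infer_required_stage_py (file_path : String) (out : String) : Prop := out = infer_required_stage_py_alt file_path
instance (file_path : String) (out : String) : Decidable (Spec_infer_required_stage_py file_path out) := by unfold Spec_infer_required_stage_py; infer_instance

-- ===== CLAIM (what is proved, stated in full; the proofs are below) =====
def Claim_equal_infer_required_stage_py : Prop := ∀ (file_path : String), Dom_infer_required_stage_py file_path → Spec_infer_required_stage_py file_path (infer_required_stage_py file_path)

-- ===== LEMMAS AND PROOFS =====

-- "first rule whose flag is set" — the value a sorted-label table's minimum collapses to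
def pvFirstMatch (d : String) : List (Bool × String) → String
  | [] => d
  | (b, a) :: t => if b then a else pvFirstMatch d t

theorem pvFoldlMinEq (x : String) (t : List String) (h : ∀ y ∈ t, x ≤ y) :
    t.foldl min x = x := by
  induction t with
  | nil => rfl
  | cons y t ih =>
      have hx : min x y = x := min_eq_left (h y (by simp))
      simp only [List.foldl_cons, hx]
      exact ih (fun z hz => h z (by simp [hz]))

-- min-with-default of the present labels of a label-sorted flag table = first present label
theorem pvMinSortedTable (d : String) (l : List (Bool × String))
    (h : (l.map Prod.snd).Pairwise (· ≤ ·)) :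
    (PySem.List.min? (l.filterMap fun p => if p.1 then some p.2 else none) (fun x => x)).getD d
      = pvFirstMatch d l := by
  induction l with
  | nil => rfl
  | cons p t ih =>
      obtain ⟨b, a⟩ := p
      simp only [List.map_cons, List.pairwise_cons] at h
      cases b with
      | false =>
          simp only [List.filterMap_cons, pvFirstMatch, Bool.false_eq_true, reduceIte]
          exact ih h.2
      | true =>
          simp only [List.filterMap_cons, pvFirstMatch, reduceIte]
          rw [PySem.List.min?_id_cons]
          simp only [Option.getD_some]
          apply pvFoldlMinEq
          intro y hy
          obtain ⟨q, hq, hqy⟩ := List.mem_filterMap.mp hy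
          apply h.1
          rcases q with ⟨qb, qa⟩
          cases qb
          · simp at hqy
          · simp only [reduceIte, Option.some.injEq] at hqy
            subst hqy
            exact List.mem_map.mpr ⟨(true, qa), hq, rfl⟩

theorem pvIfOr {α : Type} (a b : Bool) (x y : α) :
    (if (a || b) = true then x else y) = if a = true then x else if b = true then x else y := by
  cases a <;> simp

-- ===== VERDICT (by name: the statement is the Claim_ definition above) =====
theorem infer_required_stage_py_spec : Claim_equal_infer_required_stage_py := by
  intro file_path _
  unfold Spec_infer_required_stage_py
  have hB := pvMinSortedTable "stage_04_build"
    (pvKeywordStage.map fun kv =>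
      (PySem.Str.isIn kv.1 (PySem.Str.lower file_path), kv.2))
    (by
      rw [← List.isChain_iff_pairwise]
      simp only [pvKeywordStage, List.map_cons, List.map_nil, List.isChain_cons_cons,
        List.isChain_singleton, and_true, String.le_iff_toList_le]
      refine ⟨?_, ?_, ?_, ?_, ?_, ?_, ?_, ?_, ?_, ?_, ?_, ?_, ?_, ?_, ?_, ?_, ?_⟩ <;> decide)
  rw [List.filterMap_map] at hB
  simp only [Function.comp_def] at hB
  simp only [infer_required_stage_py, infer_required_stage_py_alt]
  rw [hB]
  simp only [pvKeywordStage, List.map_cons, List.map_nil, pvFirstMatch,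
    List.any_cons, List.any_nil, Bool.or_false, pvIfOr]
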